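-- pv_equiv track=rewrite | github.com/satyanarayan-rao/protein_binding_at_enhancers | scripts/modules_for_cobinding.py | get_read_start_and_end_from_lex_rex_reads
-- ===== SOURCE A (Python) =====
-- def get_read_start_and_end_from_lex_rex_reads(fvec):
--     """
--      0 1 2 3 4 5 6 7 8 9101112
--      M M F . . . F F F F M M M
--      return: 2, 9
--     """
--     read_start = None
--     read_end = None
--     for i in range(len(fvec)):
--         if fvec[i] != 'M':
--             read_start = i
--             break
--     for i in range(len(fvec) - 1, -1, -1):
--         if fvec[i] !='M':
--             read_end = i
--             break
--     return read_start, read_end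
-- ===== SOURCE B (Python) =====
-- def get_read_start_and_end_from_lex_rex_reads(fvec):
--     idx = [i for i, c in enumerate(fvec) if c != 'M']
--     if idx:
--         return idx[0], idx[-1]
--     return None, None
-- ===== Notes on version B (the rewrite author's own statement) =====
-- stated objective: simpler
-- what changed: Replaces the two opposed early-breaking index scans with a single forward pass that collects all non-'M' positions and reads off the first and last entries.
import Mathlib
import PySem

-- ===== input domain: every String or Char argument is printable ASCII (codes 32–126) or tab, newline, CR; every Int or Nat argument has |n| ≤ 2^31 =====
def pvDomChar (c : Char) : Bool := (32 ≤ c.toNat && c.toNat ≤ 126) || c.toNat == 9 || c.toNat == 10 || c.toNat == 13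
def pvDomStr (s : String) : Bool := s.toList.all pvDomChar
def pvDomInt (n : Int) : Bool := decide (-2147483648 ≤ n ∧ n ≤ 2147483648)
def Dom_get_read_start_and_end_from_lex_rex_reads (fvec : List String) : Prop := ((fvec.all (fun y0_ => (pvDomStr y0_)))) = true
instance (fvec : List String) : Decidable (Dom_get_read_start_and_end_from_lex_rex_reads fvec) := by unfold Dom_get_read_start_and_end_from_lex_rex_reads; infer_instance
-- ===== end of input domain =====

-- B builds the full list of non-'M' positions in one forward pass and reads off its
-- endpoints, instead of A's two opposed early-breaking scans (objective: simpler).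

-- ===== PORT A =====
-- first loop: for i in range(len(fvec)): if fvec[i] != 'M': read_start = i; break
def pvFirstScan : List String → Int → Option Int
  | [], _ => none
  | x :: xs, i => if x != "M" then some i else pvFirstScan xs (i + 1)

-- second loop: for i in range(len(fvec)-1, -1, -1): if fvec[i] != 'M': read_end = i; break
-- (descending index loop = scan of the reversed list with the index counting down)
def pvLastScan : List String → Int → Option Int
  | [], _ => none
  | x :: xs, i => if x != "M" then some i else pvLastScan xs (i - 1)

def get_read_start_and_end_from_lex_rex_reads (fvec : List String) : Option Int × Option Int :=
  (pvFirstScan fvec 0, pvLastScan fvec.reverse ((fvec.length : Int) - 1))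

-- ===== PORT B =====
def get_read_start_and_end_from_lex_rex_reads_alt (fvec : List String) : Option Int × Option Int :=
  let idx := ((PySem.List.enumerate fvec 0).filter (fun p => p.2 != "M")).map Prod.fst
  match idx with
  | [] => (none, none)
  | h :: t => (some h, some ((h :: t).getLast (List.cons_ne_nil h t)))

-- ===== PRECONDITION & SPEC =====
def Spec_get_read_start_and_end_from_lex_rex_reads (fvec : List String) (out : Option Int × Option Int) : Prop := out = get_read_start_and_end_from_lex_rex_reads_alt fvec
instance (fvec : List String) (out : Option Int × Option Int) : Decidable (Spec_get_read_start_and_end_from_lex_rex_reads fvec out) := by unfold Spec_get_read_start_and_end_from_lex_rex_reads; infer_instance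

-- ===== CLAIM (what is proved, stated in full; the proofs are below) =====
def Claim_equal_get_read_start_and_end_from_lex_rex_reads : Prop := ∀ (fvec : List String), Dom_get_read_start_and_end_from_lex_rex_reads fvec → Spec_get_read_start_and_end_from_lex_rex_reads fvec (get_read_start_and_end_from_lex_rex_reads fvec)

-- ===== LEMMAS AND PROOFS =====

-- the list of non-'M' positions of xs, the first position being labelled i
def pvIdx : List String → Int → List Int
  | [], _ => []
  | x :: xs, i => if x != "M" then i :: pvIdx xs (i + 1) else pvIdx xs (i + 1)

theorem pvIdx_eq_filter_enumerate (xs : List String) (i : Int) :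
    ((PySem.List.enumerate xs i).filter (fun p => p.2 != "M")).map Prod.fst = pvIdx xs i := by
  induction xs generalizing i with
  | nil => simp [PySem.List.enumerate_nil, pvIdx]
  | cons x xs ih =>
    simp only [PySem.List.enumerate_cons, List.filter_cons, pvIdx]
    by_cases h : x != "M" <;> simp [h, ih]

theorem pvFirstScan_eq_head (xs : List String) (i : Int) :
    pvFirstScan xs i = (pvIdx xs i).head? := by
  induction xs generalizing i with
  | nil => rfl
  | cons x xs ih =>
    simp only [pvFirstScan, pvIdx]
    by_cases h : x != "M" <;> simp [h, ih]

theorem pvIdx_append (xs : List String) (x : String) (i : Int) :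
    pvIdx (xs ++ [x]) i = pvIdx xs i ++ (if x != "M" then [i + xs.length] else []) := by
  induction xs generalizing i with
  | nil => by_cases h : x != "M" <;> simp [pvIdx, h]
  | cons y ys ih =>
    simp only [List.cons_append, pvIdx, ih]
    by_cases h : y != "M" <;> simp [h] <;> ring_nf
  -- ring_nf aligns i + 1 + ys.length with i + (ys.length + 1)

theorem pvLastScan_eq_getLast (xs : List String) :
    pvLastScan xs.reverse ((xs.length : Int) - 1) = (pvIdx xs 0).getLast? := by
  induction xs using List.reverseRecOn with
  | nil => rfl
  | append_singleton ys x ih =>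
    rw [pvIdx_append]
    simp only [List.reverse_append, List.reverse_singleton, List.singleton_append,
      List.length_append, List.length_singleton]
    by_cases h : x != "M"
    · simp [pvLastScan, h]
    · simpa [pvLastScan, h] using ih

-- ===== VERDICT (by name: the statement is the Claim_ definition above) =====
theorem get_read_start_and_end_from_lex_rex_reads_spec : Claim_equal_get_read_start_and_end_from_lex_rex_reads := by
  intro fvec _
  unfold Spec_get_read_start_and_end_from_lex_rex_reads
  unfold get_read_start_and_end_from_lex_rex_reads get_read_start_and_end_from_lex_rex_reads_alt
  simp only [pvIdx_eq_filter_enumerate, pvFirstScan_eq_head, pvLastScan_eq_getLast]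
  cases h : pvIdx fvec 0 with
  | nil => simp
  | cons a t => simp [List.getLast?_eq_some_getLast]
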